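-- pv_equiv track=rewrite | github.com/V3ndet4/ufc-bot | data_sources/fight_week_watch.py | _alert_category_from_keywords
-- ===== SOURCE A (Python) =====
-- def _alert_category_from_keywords(keywords: list[str]) -> str:
--     keyword_set = {keyword.lower() for keyword in keywords}
--     if keyword_set & {"weight cut", "weight-cut", "missed weight", "misses weight", "scale issue", "weigh-in", "weigh in"}:
--         return "weight"
--     if keyword_set & {"injury", "injured", "hurt", "withdraws", "withdrawn", "medical issue", "illness", "infection"}:
--         return "injury"
--     if keyword_set & {"short notice", "late notice", "late-notice"}:
--         return "short_notice"
--     if keyword_set & {"replacement", "replaces", "steps in", "fill in"}: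
--         return "replacement"
--     return "camp"
-- ===== SOURCE B (Python) =====
-- _PRIORITY_RANK = {
--     "weight cut": 0, "weight-cut": 0, "missed weight": 0, "misses weight": 0,
--     "scale issue": 0, "weigh-in": 0, "weigh in": 0,
--     "injury": 1, "injured": 1, "hurt": 1, "withdraws": 1, "withdrawn": 1,
--     "medical issue": 1, "illness": 1, "infection": 1,
--     "short notice": 2, "late notice": 2, "late-notice": 2,
--     "replacement": 3, "replaces": 3, "steps in": 3, "fill in": 3,
-- }
-- _CATEGORIES = ["weight", "injury", "short_notice", "replacement", "camp"]
--
--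
-- def _alert_category_from_keywords(keywords: list[str]) -> str:
--     best = 4
--     for keyword in keywords:
--         best = min(best, _PRIORITY_RANK.get(keyword.lower(), 4))
--     return _CATEGORIES[best]
-- ===== Notes on version B (the rewrite author's own statement) =====
-- stated objective: alternative
-- what changed: B replaces A's set building plus four staged set-intersection tests by a single left-to-right min-reduction: each keyword is mapped to a numeric priority rank (0..3, 4 = no match), the running minimum is kept in one accumulator, and the final rank indexes a category table.
import Mathlib
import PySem

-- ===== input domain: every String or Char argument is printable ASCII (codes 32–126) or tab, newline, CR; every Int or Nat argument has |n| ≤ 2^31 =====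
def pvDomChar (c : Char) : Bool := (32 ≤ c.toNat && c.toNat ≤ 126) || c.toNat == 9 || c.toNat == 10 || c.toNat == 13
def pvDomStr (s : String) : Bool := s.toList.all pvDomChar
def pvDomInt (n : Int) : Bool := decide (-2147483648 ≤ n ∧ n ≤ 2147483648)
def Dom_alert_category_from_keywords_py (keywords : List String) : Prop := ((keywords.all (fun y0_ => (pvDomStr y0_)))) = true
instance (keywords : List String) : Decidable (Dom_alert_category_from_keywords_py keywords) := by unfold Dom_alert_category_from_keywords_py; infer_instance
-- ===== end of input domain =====

-- B replaces A's set building plus four staged set-intersection tests by a single min-reduction over the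
-- keywords (phrase → numeric priority rank, running minimum in one accumulator, rank indexes a category
-- table). Objective: alternative; same behaviour, no speed claim.

-- ===== PORT A =====
-- the four keyword-set literals of A's four `if` lines, in source order
def pvWeightPhrases : PySem.Set String := PySem.Set.ofList ["weight cut", "weight-cut", "missed weight", "misses weight", "scale issue", "weigh-in", "weigh in"]
def pvInjuryPhrases : PySem.Set String := PySem.Set.ofList ["injury", "injured", "hurt", "withdraws", "withdrawn", "medical issue", "illness", "infection"]
def pvShortPhrases : PySem.Set String := PySem.Set.ofList ["short notice", "late notice", "late-notice"]
def pvReplacementPhrases : PySem.Set String := PySem.Set.ofList ["replacement", "replaces", "steps in", "fill in"]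

def alert_category_from_keywords_py (keywords : List String) : String :=
  let keyword_set : PySem.Set String := PySem.Set.ofList (keywords.map PySem.Str.lower)
  if PySem.Set.inter keyword_set pvWeightPhrases ≠ [] then "weight"
  else if PySem.Set.inter keyword_set pvInjuryPhrases ≠ [] then "injury"
  else if PySem.Set.inter keyword_set pvShortPhrases ≠ [] then "short_notice"
  else if PySem.Set.inter keyword_set pvReplacementPhrases ≠ [] then "replacement"
  else "camp"

-- ===== PORT B =====
-- the rank table _PRIORITY_RANK of Source B
def pvRankPairs : List (String × Nat) :=
  [("weight cut", 0), ("weight-cut", 0), ("missed weight", 0), ("misses weight", 0), ("scale issue", 0), ("weigh-in", 0), ("weigh in", 0),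
   ("injury", 1), ("injured", 1), ("hurt", 1), ("withdraws", 1), ("withdrawn", 1), ("medical issue", 1), ("illness", 1), ("infection", 1),
   ("short notice", 2), ("late notice", 2), ("late-notice", 2),
   ("replacement", 3), ("replaces", 3), ("steps in", 3), ("fill in", 3)]

def pvPriorityRank : PySem.Dict String Nat := PySem.Dict.ofList pvRankPairs

def pvCategories : List String := ["weight", "injury", "short_notice", "replacement", "camp"]

def alert_category_from_keywords_py_alt (keywords : List String) : String :=
  let best : Nat :=
    keywords.foldl (fun b keyword => min b (pvPriorityRank.getD (PySem.Str.lower keyword) 4)) 4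
  -- `_CATEGORIES[best]`: best is always ≤ 4, so plain in-range indexing (List.getD exact here)
  pvCategories.getD best ""

-- ===== PRECONDITION & SPEC =====
def Spec_alert_category_from_keywords_py (keywords : List String) (out : String) : Prop := out = alert_category_from_keywords_py_alt keywords
instance (keywords : List String) (out : String) : Decidable (Spec_alert_category_from_keywords_py keywords out) := by unfold Spec_alert_category_from_keywords_py; infer_instance

-- ===== CLAIM (what is proved, stated in full; the proofs are below) =====
def Claim_equal_alert_category_from_keywords_py : Prop := ∀ (keywords : List String), Dom_alert_category_from_keywords_py keywords → Spec_alert_category_from_keywords_py keywords (alert_category_from_keywords_py keywords)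

-- ===== LEMMAS AND PROOFS =====

-- lookup in an assoc-list dict with distinct keys is pair membership
lemma pvGet?_mem {ν : Type} (ps : List (String × ν)) (h : (ps.map Prod.fst).Nodup) (s : String) (c : ν) :
    (PySem.Dict.mk ps).get? s = some c ↔ (s, c) ∈ ps := by
  induction ps with
  | nil => simp [PySem.Dict.get?]
  | cons p rest ih =>
    obtain ⟨k, v⟩ := p
    rw [PySem.Dict.get?_mk_cons]
    simp only [List.map_cons, List.nodup_cons] at h
    by_cases hk : k = s
    · subst hk
      simp only [beq_self_eq_true, if_pos]
      constructor
      · rintro hv; cases hv; exact List.mem_cons_self ..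
      · intro hm
        rcases List.mem_cons.1 hm with he | hm
        · cases he; rfl
        · exact absurd (List.mem_map_of_mem (f := Prod.fst) hm) h.1
    · rw [if_neg (by simpa using hk)]
      rw [ih h.2]
      simp [List.mem_cons, Ne.symm hk]

set_option maxHeartbeats 1000000 in
lemma pvRank_get? (s : String) (c : Nat) :
    pvPriorityRank.get? s = some c ↔ (s, c) ∈ pvRankPairs := by
  rw [show pvPriorityRank = PySem.Dict.mk pvRankPairs from by decide]
  exact pvGet?_mem _ (by decide) s c

-- the rank of s is i (i < 4) exactly when (s, i) is a table entry
lemma pvRank_getD (s : String) (i : Nat) (hi : i < 4) :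
    pvPriorityRank.getD s 4 = i ↔ (s, i) ∈ pvRankPairs := by
  rw [PySem.Dict.getD_eq_get?_getD]
  cases hg : pvPriorityRank.get? s with
  | none =>
    simp only [Option.getD_none]
    constructor
    · intro h; omega
    · intro hm
      have := (pvRank_get? s i).2 hm
      rw [hg] at this; cases this
  | some r =>
    simp only [Option.getD_some]
    constructor
    · rintro rfl; exact (pvRank_get? s r).1 hg
    · intro hm
      have := (pvRank_get? s i).2 hm
      rw [hg] at this; exact Option.some.inj this

-- running minimum over a list, characterised by ≤
lemma pvFoldlMin_le (f : String → Nat) (kws : List String) (b n : Nat) :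
    kws.foldl (fun b k => min b (f k)) b ≤ n ↔ b ≤ n ∨ ∃ k ∈ kws, f k ≤ n := by
  induction kws generalizing b with
  | nil => simp
  | cons a rest ih =>
    simp only [List.foldl_cons, ih, min_le_iff, List.mem_cons]
    constructor
    · rintro ((h | h) | ⟨k, hk, hf⟩)
      · exact Or.inl h
      · exact Or.inr ⟨a, Or.inl rfl, h⟩
      · exact Or.inr ⟨k, Or.inr hk, hf⟩
    · rintro (h | ⟨k, (rfl | hk), hf⟩)
      · exact Or.inl (Or.inl h)
      · exact Or.inl (Or.inr hf)
      · exact Or.inr ⟨k, hk, hf⟩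

-- A's intersection test for category i agrees with "some keyword has rank i"
lemma pvCond (kws : List String) (t : PySem.Set String) (i : Nat) (hi : i < 4)
    (hbr : ∀ s : String, s ∈ t ↔ (s, i) ∈ pvRankPairs) :
    (PySem.Set.inter (PySem.Set.ofList (kws.map PySem.Str.lower)) t ≠ []) ↔
      ∃ k ∈ kws, pvPriorityRank.getD (PySem.Str.lower k) 4 = i := by
  rw [← List.isEmpty_eq_false_iff, List.isEmpty_eq_false_iff_exists_mem]
  simp only [PySem.Set.mem_inter, PySem.Set.mem_ofList, List.mem_map]
  constructor
  · rintro ⟨x, ⟨k, hk, rfl⟩, hx⟩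
    exact ⟨k, hk, (pvRank_getD _ _ hi).2 ((hbr _).1 hx)⟩
  · rintro ⟨k, hk, hx⟩
    exact ⟨PySem.Str.lower k, ⟨k, hk, rfl⟩, (hbr _).2 ((pvRank_getD _ _ hi).1 hx)⟩

set_option maxHeartbeats 1000000 in
theorem alert_category_from_keywords_py_spec : Claim_equal_alert_category_from_keywords_py := by
  intro kws _
  unfold Spec_alert_category_from_keywords_py alert_category_from_keywords_py alert_category_from_keywords_py_alt
  set f : String → Nat := fun k => pvPriorityRank.getD (PySem.Str.lower k) 4 with hf
  set best : Nat := kws.foldl (fun b k => min b (f k)) 4 with hbest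
  have hle : ∀ n, best ≤ n ↔ 4 ≤ n ∨ ∃ k ∈ kws, f k ≤ n := fun n => by
    rw [hbest]; exact pvFoldlMin_le f kws 4 n
  have hb4 : best ≤ 4 := (hle 4).2 (Or.inl le_rfl)
  have hw := pvCond kws pvWeightPhrases 0 (by omega) (fun s => by simp [pvWeightPhrases, PySem.Set.mem_ofList, pvRankPairs])
  have hi := pvCond kws pvInjuryPhrases 1 (by omega) (fun s => by simp [pvInjuryPhrases, PySem.Set.mem_ofList, pvRankPairs])
  have hs := pvCond kws pvShortPhrases 2 (by omega) (fun s => by simp [pvShortPhrases, PySem.Set.mem_ofList, pvRankPairs])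
  have hr := pvCond kws pvReplacementPhrases 3 (by omega) (fun s => by simp [pvReplacementPhrases, PySem.Set.mem_ofList, pvRankPairs])
  by_cases c0 : ∃ k ∈ kws, f k = 0
  · have : best = 0 := Nat.le_zero.1 ((hle 0).2 (Or.inr (c0.imp fun k ⟨hk, h⟩ => ⟨hk, h.le⟩)))
    rw [if_pos (hw.2 c0), this]; rfl
  · rw [if_neg (fun h => c0 (hw.1 h))]
    by_cases c1 : ∃ k ∈ kws, f k = 1
    · have h1 : best ≤ 1 := (hle 1).2 (Or.inr (c1.imp fun k ⟨hk, h⟩ => ⟨hk, h.le⟩))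
      have h0 : ¬ best ≤ 0 := fun h => by
        rcases (hle 0).1 h with h | ⟨k, hk, hfk⟩
        · omega
        · exact c0 ⟨k, hk, Nat.le_zero.1 hfk⟩
      have : best = 1 := by omega
      rw [if_pos (hi.2 c1), this]; rfl
    · rw [if_neg (fun h => c1 (hi.1 h))]
      by_cases c2 : ∃ k ∈ kws, f k = 2
      · have h2 : best ≤ 2 := (hle 2).2 (Or.inr (c2.imp fun k ⟨hk, h⟩ => ⟨hk, h.le⟩))
        have h1 : ¬ best ≤ 1 := fun h => by
          rcases (hle 1).1 h with h | ⟨k, hk, hfk⟩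
          · omega
          · interval_cases h : (f k) <;> [exact c0 ⟨k, hk, h⟩; exact c1 ⟨k, hk, h⟩]
        have : best = 2 := by omega
        rw [if_pos (hs.2 c2), this]; rfl
      · rw [if_neg (fun h => c2 (hs.1 h))]
        by_cases c3 : ∃ k ∈ kws, f k = 3
        · have h3 : best ≤ 3 := (hle 3).2 (Or.inr (c3.imp fun k ⟨hk, h⟩ => ⟨hk, h.le⟩))
          have h2 : ¬ best ≤ 2 := fun h => by
            rcases (hle 2).1 h with h | ⟨k, hk, hfk⟩
            · omega
            · interval_cases h : (f k) <;> [exact c0 ⟨k, hk, h⟩; exact c1 ⟨k, hk, h⟩; exact c2 ⟨k, hk, h⟩]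
          have : best = 3 := by omega
          rw [if_pos (hr.2 c3), this]; rfl
        · rw [if_neg (fun h => c3 (hr.1 h))]
          have h3 : ¬ best ≤ 3 := fun h => by
            rcases (hle 3).1 h with h | ⟨k, hk, hfk⟩
            · omega
            · interval_cases h : (f k) <;> [exact c0 ⟨k, hk, h⟩; exact c1 ⟨k, hk, h⟩; exact c2 ⟨k, hk, h⟩; exact c3 ⟨k, hk, h⟩]
          have : best = 4 := by omega
          rw [this]; rfl
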